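-- pv_equiv track=rewrite | github.com/dizmerly/zScoreStatsTable | sideMain.py | coefficientEval
-- ===== SOURCE A (Python) =====
-- def coefficientEval(intervals):
--     coef = []
--     # make sure interval number is even for Simpson rule
--     if intervals % 2 == 0:
--         for x in range(intervals + 1):
--             if x == 0:
--                 coef.append(1)
--             elif x == intervals:
--                 coef.append(1)
--             elif (x % 2) == 1:
--                 coef.append(4)
--             elif (x % 2) == 0:
--                 coef.append(2)
--         return coef
--     else:
--         return "Please use an even n value"
-- ===== SOURCE B (Python) =====
-- def coefficientEval(intervals):
--     # make sure interval number is even for Simpson rule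
--     if intervals % 2 != 0:
--         return "Please use an even n value"
--     if intervals < 0:
--         return []
--     if intervals == 0:
--         return [1]
--     # assemble from blocks: endpoints 1, repeated [4, 2] body, closing 4
--     return [1] + [4, 2] * (intervals // 2 - 1) + [4, 1]
-- ===== Notes on version B (the rewrite author's own statement) =====
-- stated objective: alternative
-- what changed: Replaces the per-index branching loop over range(n+1) by direct block assembly [1] + [4,2]*(n//2-1) + [4,1], building the body by list repetition instead of any per-element parity/endpoint test.
-- outside the precondition, e.g. on coefficientEval(3): A returns 'Please use an even n value', B returns 'Please use an even n value'
import Mathlib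
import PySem

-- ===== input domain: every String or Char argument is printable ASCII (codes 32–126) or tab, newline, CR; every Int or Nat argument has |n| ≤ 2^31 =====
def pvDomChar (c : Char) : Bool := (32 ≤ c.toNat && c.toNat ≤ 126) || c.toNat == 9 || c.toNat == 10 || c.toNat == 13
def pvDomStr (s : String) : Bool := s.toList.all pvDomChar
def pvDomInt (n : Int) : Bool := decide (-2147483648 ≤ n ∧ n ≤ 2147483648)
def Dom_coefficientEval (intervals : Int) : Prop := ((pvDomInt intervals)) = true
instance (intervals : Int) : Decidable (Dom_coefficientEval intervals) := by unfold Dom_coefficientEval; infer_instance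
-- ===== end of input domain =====

-- B assembles the coefficient list directly from blocks ([1] + [4,2]*(n//2-1) + [4,1])
-- instead of A's per-index branching loop (objective: alternative).

-- ===== PORT A =====
-- Odd `intervals` make the Python return a string, not a list of ints: excluded by Pre_.
def coefficientEval (intervals : Int) : List Int :=
  if intervals % 2 == 0 then
    (PySem.List.pyRange 0 (intervals + 1) 1).foldl (fun coef x =>
      if x == 0 then coef ++ [1]
      else if x == intervals then coef ++ [1]
      else if x % 2 == 1 then coef ++ [4]
      else if x % 2 == 0 then coef ++ [2]
      else coef) []
  else []

-- ===== PORT B =====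
def coefficientEval_alt (intervals : Int) : List Int :=
  if intervals % 2 != 0 then []
  else if intervals < 0 then []
  else if intervals == 0 then [1]
  else [1] ++ PySem.List.pyRepeat [4, 2] (PySem.Int.floordiv intervals 2 - 1) ++ [4, 1]

-- ===== PRECONDITION & SPEC =====
-- Pre_ excludes odd `intervals`, on which the Python functions return a string
-- ("Please use an even n value") instead of a value of the declared list-of-int type.
def Pre_coefficientEval (intervals : Int) : Prop := intervals % 2 = 0
instance (intervals : Int) : Decidable (Pre_coefficientEval intervals) := by unfold Pre_coefficientEval; infer_instance
def pvWitness_coefficientEval : Int := (4)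
def Spec_coefficientEval (intervals : Int) (out : List Int) : Prop := out = coefficientEval_alt intervals
instance (intervals : Int) (out : List Int) : Decidable (Spec_coefficientEval intervals out) := by unfold Spec_coefficientEval; infer_instance

-- ===== CLAIM (what is proved, stated in full; the proofs are below) =====
def Claim_equal_coefficientEval : Prop := ∀ (intervals : Int), Dom_coefficientEval intervals → Pre_coefficientEval intervals → Spec_coefficientEval intervals (coefficientEval intervals)

-- ===== LEMMAS AND PROOFS =====

-- the closed form A's loop body produces at element x
def simpCoef (n : Int) (x : Int) : Int :=
  if x = 0 then 1 else if x = n then 1 else if x % 2 = 1 then 4 else 2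

lemma portA_eq_map (n : Int) (h : n % 2 = 0) :
    coefficientEval n = (PySem.List.pyRange 0 (n + 1) 1).map (simpCoef n) := by
  unfold coefficientEval
  rw [if_pos (by simpa using h)]
  have hcongr : ∀ (acc : List Int) (x : Int), x ∈ PySem.List.pyRange 0 (n + 1) 1 →
      (if x == 0 then acc ++ [1]
       else if x == n then acc ++ [1]
       else if x % 2 == 1 then acc ++ [4]
       else if x % 2 == 0 then acc ++ [2]
       else acc) = acc ++ [simpCoef n x] := by
    intro acc x _
    unfold simpCoef
    rcases Int.emod_two_eq_zero_or_one x with h2 | h2 <;> simp [h2] <;> split_ifs <;> simp_all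
  rw [PySem.List.foldl_congr_mem _ _ _ _ hcongr,
      PySem.List.foldl_append_singleton_eq_map]
  simp

-- the repeated [4,2] block as a map over range, for index reasoning
lemma repeat_block_eq_map (k : Nat) :
    (List.replicate k ([4, 2] : List Int)).flatten =
      (List.range (2 * k)).map (fun i => if i % 2 = 0 then (4 : Int) else 2) := by
  induction k with
  | zero => simp
  | succ k ih =>
    rw [List.replicate_succ', List.flatten_append, ih]
    have h1 : 2 * (k + 1) = (2 * k + 1) + 1 := by omega
    rw [h1, List.range_succ, List.range_succ]
    simp [List.map_append]

theorem coefficientEval_eq_alt (n : Int) (h : n % 2 = 0) :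
    coefficientEval n = coefficientEval_alt n := by
  rw [portA_eq_map n h]
  unfold coefficientEval_alt
  rw [if_neg (by simpa using h)]
  by_cases hneg : n < 0
  · rw [if_pos hneg, PySem.List.pyRange_one_eq_nil (by omega)]; simp
  · rw [if_neg hneg]
    by_cases h0 : n = 0
    · subst h0
      simp [PySem.List.pyRange_one_cons (by norm_num : (0:Int) < 1),
            PySem.List.pyRange_one_eq_nil (le_refl (1:Int)), simpCoef]
    · rw [if_neg (by simpa using h0)]
      -- n is even and ≥ 2; write n = 2 * m
      obtain ⟨m, hm⟩ : ∃ m : Int, n = 2 * m := ⟨n / 2, by omega⟩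
      have hm1 : 1 ≤ m := by omega
      have hfd : PySem.Int.floordiv n 2 - 1 = m - 1 := by
        unfold PySem.Int.floordiv
        rw [hm, Int.mul_fdiv_cancel_left _ (by norm_num)]
      rw [hfd]
      unfold PySem.List.pyRepeat
      rw [repeat_block_eq_map]
      have hk : (2 : Int) * ((m - 1).toNat : Int) = n - 2 := by omega
      apply List.ext_getElem
      · simp [PySem.List.length_pyRange_one]
        omega
      · intro i h1 h2
        have hi : (i : Int) < n + 1 := by
          have := h1; simp [PySem.List.length_pyRange_one] at this; omega
        rw [List.getElem_map, PySem.List.getElem_pyRange_one 0 (n + 1) i (by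
          simp [PySem.List.length_pyRange_one] at h1 ⊢; omega)]
        simp only [zero_add]
        rcases Nat.eq_zero_or_pos i with hi0 | hi1
        · subst hi0; simp [simpCoef]
        · obtain ⟨j, rfl⟩ : ∃ j, i = j + 1 := ⟨i - 1, by omega⟩
          simp only [List.singleton_append]
          rw [List.getElem_append]
          simp only [List.length_cons, List.length_map, List.length_range]
          by_cases hmid : j + 1 < 2 * (m - 1).toNat + 1
          · rw [dif_pos hmid]
            simp only [List.getElem_cons_succ, List.getElem_map, List.getElem_range]
            have hne0 : ((j + 1 : Nat) : Int) ≠ 0 := by omega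
            have hnen : ((j + 1 : Nat) : Int) ≠ n := by omega
            simp only [simpCoef, if_neg hne0, if_neg hnen]
            by_cases hp : j % 2 = 0
            · rw [if_pos hp, if_pos (by omega)]
            · rw [if_neg hp, if_neg (by omega)]
          · rw [dif_neg hmid]
            have hcase : j + 1 - (2 * (m - 1).toNat + 1) = 0 ∨
                j + 1 - (2 * (m - 1).toNat + 1) = 1 := by
              simp at h2; omega
            rcases hcase with hc | hc
            · have hieq : ((j + 1 : Nat) : Int) = n - 1 := by omega
              simp only [hc, List.getElem_cons_zero]
              simp [simpCoef, hieq]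
              omega
            · have hieq : ((j + 1 : Nat) : Int) = n := by omega
              simp only [hc]
              simp [simpCoef, hieq]

-- ===== VERDICT (by name: the statement is the Claim_ definition above) =====
theorem coefficientEval_spec : Claim_equal_coefficientEval := by
  intro n _ hpre
  unfold Spec_coefficientEval
  exact coefficientEval_eq_alt n hpre
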